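-- pv_equiv track=rewrite | github.com/gautambp/HackerRank | Master/python3/game-of-two-stacks.py | twoStacks
-- ===== SOURCE A (Python) =====
-- def twoStacks(x, a, b):
--     #
--     # Write your code here.
--     #
--     a_idx = 0
--     b_idx = 0
--     ab_sum = 0
--     while ab_sum < x:
--         if a_idx >= len(a) and b_idx >= len(b):
--             break
--         elif a_idx >= len(a):
--             ab_sum += b[b_idx]
--             b_idx += 1
--         elif b_idx >= len(b):
--             ab_sum += a[a_idx]
--             a_idx += 1
--         elif a[a_idx] >= b[b_idx]:
--             ab_sum += b[b_idx]
--             b_idx += 1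
--         else:
--             ab_sum += a[a_idx]
--             a_idx += 1
--
--     return a_idx+b_idx-1
-- ===== SOURCE B (Python) =====
-- def twoStacks(x, a, b):
--     # Phase 1: merge a and b with a two-pointer front comparison (same tie rule).
--     merged = []
--     i = 0
--     j = 0
--     while i < len(a) and j < len(b):
--         if a[i] >= b[j]:
--             merged.append(b[j])
--             j += 1
--         else:
--             merged.append(a[i])
--             i += 1
--     merged.extend(a[i:])
--     merged.extend(b[j:])
--     # Phase 2: prefix-sum scan counting elements until the sum reaches x.
--     s = 0
--     count = 0
--     for v in merged:
--         if s >= x: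
--             return count - 1
--         s += v
--         count += 1
--     return count - 1
-- ===== Notes on version B (the rewrite author's own statement) =====
-- stated objective: alternative
-- what changed: Replaces A's single while-loop that interleaves index bookkeeping, bounds tests and the sum check with two separate phases: a two-pointer merge producing the full greedy pick order, then an independent prefix-sum scan that counts elements until the sum reaches x.
import Mathlib
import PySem

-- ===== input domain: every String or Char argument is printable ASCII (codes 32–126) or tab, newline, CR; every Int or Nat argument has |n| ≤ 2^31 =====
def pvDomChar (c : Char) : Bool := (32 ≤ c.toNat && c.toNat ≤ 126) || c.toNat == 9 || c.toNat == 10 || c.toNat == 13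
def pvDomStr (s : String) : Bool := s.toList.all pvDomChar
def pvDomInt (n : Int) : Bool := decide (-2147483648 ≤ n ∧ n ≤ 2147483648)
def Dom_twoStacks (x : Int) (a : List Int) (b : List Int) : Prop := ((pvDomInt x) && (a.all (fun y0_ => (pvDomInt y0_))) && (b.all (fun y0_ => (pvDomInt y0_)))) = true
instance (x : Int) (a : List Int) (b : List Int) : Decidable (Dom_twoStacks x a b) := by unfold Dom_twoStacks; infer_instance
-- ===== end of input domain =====

-- B rewrites A's single interleaved while-loop as two phases (two-pointer merge, then a
-- prefix-sum scan); same return value everywhere ('alternative', no speed claim).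

-- ===== PORT A =====
-- A's while loop: state is the two indices and the running sum; the index suffixes of a and b
-- stand for the indices (a_idx ≥ len(a) ↔ suffix empty, a[a_idx] = head), acc = a_idx + b_idx.
def twoStacksLoopA (x : Int) (ra rb : List Int) (s acc : Int) : Int :=
  if s < x then
    match ra, rb with
    | [], [] => acc - 1                                              -- break
    | [], hb :: tb => twoStacksLoopA x [] tb (s + hb) (acc + 1)      -- a exhausted
    | ha :: ta, [] => twoStacksLoopA x ta [] (s + ha) (acc + 1)      -- b exhausted
    | ha :: ta, hb :: tb =>
        if ha ≥ hb then twoStacksLoopA x (ha :: ta) tb (s + hb) (acc + 1)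
        else twoStacksLoopA x ta (hb :: tb) (s + ha) (acc + 1)
  else acc - 1
termination_by ra.length + rb.length

def twoStacks (x : Int) (a : List Int) (b : List Int) : Int :=
  twoStacksLoopA x a b 0 0

-- ===== PORT B =====
-- Phase 1 of Source B: two-pointer merge, then extend with the leftover suffixes.
def twoStacksMerge : List Int → List Int → List Int
  | [], rb => rb
  | ra, [] => ra
  | ha :: ta, hb :: tb =>
      if ha ≥ hb then hb :: twoStacksMerge (ha :: ta) tb
      else ha :: twoStacksMerge ta (hb :: tb)

-- Phase 2 of Source B: prefix-sum scan, returning count-1 when the sum reaches x (or at the end).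
def twoStacksScan (x : Int) : List Int → Int → Int → Int
  | l, s, count =>
    if s ≥ x then count - 1
    else match l with
      | [] => count - 1
      | v :: t => twoStacksScan x t (s + v) (count + 1)

def twoStacks_alt (x : Int) (a : List Int) (b : List Int) : Int :=
  twoStacksScan x (twoStacksMerge a b) 0 0

-- ===== PRECONDITION & SPEC =====
def Spec_twoStacks (x : Int) (a : List Int) (b : List Int) (out : Int) : Prop := out = twoStacks_alt x a b
instance (x : Int) (a : List Int) (b : List Int) (out : Int) : Decidable (Spec_twoStacks x a b out) := by unfold Spec_twoStacks; infer_instance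

-- ===== CLAIM (what is proved, stated in full; the proofs are below) =====
def Claim_equal_twoStacks : Prop := ∀ (x : Int) (a : List Int) (b : List Int), Dom_twoStacks x a b → Spec_twoStacks x a b (twoStacks x a b)

-- ===== LEMMAS AND PROOFS =====
theorem merge_nil_left (rb : List Int) : twoStacksMerge [] rb = rb := by
  cases rb <;> simp [twoStacksMerge]

theorem merge_nil_right (ra : List Int) : twoStacksMerge ra [] = ra := by
  cases ra <;> simp [twoStacksMerge]

theorem loopA_eq_scan_merge (x : Int) (ra rb : List Int) (s acc : Int) :
    twoStacksLoopA x ra rb s acc = twoStacksScan x (twoStacksMerge ra rb) s acc := by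
  fun_induction twoStacksLoopA x ra rb s acc <;>
    (rw [twoStacksScan.eq_def]; simp only [twoStacksMerge, merge_nil_left, merge_nil_right]; split_ifs <;> simp_all [merge_nil_left, merge_nil_right] <;> omega)

-- ===== VERDICT (by name: the statement is the Claim_ definition above) =====
theorem twoStacks_spec : Claim_equal_twoStacks := by
  intro x a b _
  unfold Spec_twoStacks twoStacks twoStacks_alt
  exact loopA_eq_scan_merge x a b 0 0
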